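-- pv_equiv track=rewrite | github.com/NevermoreXD230/Python-3-Assignments | a4/a/a04.py | mostTouchableLocker
-- ===== SOURCE A (Python) =====
-- def mostTouchableLocker(number_of_lockers , number_of_students):
--     x = 0
--     z = 0
--     if number_of_lockers < 0 or number_of_students < 0:
--         return None
--     if number_of_lockers == 0 or number_of_students == 0 :
--         return 0
--
--     if number_of_lockers < number_of_students or number_of_lockers%number_of_students == 0:
--
--         for lockers in range(1 , number_of_lockers+1):
--             y = 0
--             for i in range(1 , lockers+1):
--
--                 if lockers % i == 0:
--
--                     y+=1
--
--                 if y >= x: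
--                     x = y
--
--             if y >= x:
--
--                 z = lockers
--         return z
--     else:
--
--         for lockers in range(1 , number_of_students+1):
--             y = 0
--             for i in range(1 , lockers+1):
--
--                 if lockers % i == 0:
--
--                     y+=1
--
--                 if y >= x:
--                     x = y
--
--             if y >= x:
--
--                 z = lockers
--         return z
-- ===== SOURCE B (Python) =====
-- def mostTouchableLocker(number_of_lockers, number_of_students):
--     if number_of_lockers < 0 or number_of_students < 0:
--         return None
--     if number_of_lockers == 0 or number_of_students == 0:
--         return 0
--     if number_of_lockers < number_of_students or number_of_lockers % number_of_students == 0: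
--         limit = number_of_lockers
--     else:
--         limit = number_of_students
--     # divisor-count sieve: add 1 at every multiple of every d
--     counts = {}
--     for d in range(1, limit + 1):
--         for m in range(d, limit + 1, d):
--             counts[m] = counts.get(m, 0) + 1
--     # largest number with the maximal divisor count (tuple key breaks ties upward)
--     return max(range(1, limit + 1), key=lambda n: (counts.get(n, 0), n))
-- ===== Notes on version B (the rewrite author's own statement) =====
-- stated objective: faster
-- what changed: Replaces the per-number trial-division divisor count (inner scan 1..n for every n) and the interleaved running-max bookkeeping by a divisor-count sieve (each d adds 1 to all its multiples in a dict) followed by a single max() with tuple key (count, n) that prefers the larger number on ties.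
import Mathlib
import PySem

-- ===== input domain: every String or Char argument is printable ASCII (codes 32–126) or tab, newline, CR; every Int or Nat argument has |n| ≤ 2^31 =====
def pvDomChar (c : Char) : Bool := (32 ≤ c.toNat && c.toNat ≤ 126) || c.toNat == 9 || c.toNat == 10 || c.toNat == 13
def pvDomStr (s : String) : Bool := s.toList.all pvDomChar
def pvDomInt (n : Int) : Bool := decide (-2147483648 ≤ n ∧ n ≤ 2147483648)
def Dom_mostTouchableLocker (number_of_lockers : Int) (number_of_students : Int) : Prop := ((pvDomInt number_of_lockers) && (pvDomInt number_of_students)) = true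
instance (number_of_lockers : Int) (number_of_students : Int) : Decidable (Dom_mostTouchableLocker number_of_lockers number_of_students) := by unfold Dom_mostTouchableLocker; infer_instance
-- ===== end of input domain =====

-- B replaces A's per-number trial-division divisor count by a divisor-count sieve (dict) plus a
-- single tuple-key argmax; a timing run measured B faster (asymptotic mechanism: O(N log N) sieve vs A's O(N^2) scans).


-- ===== PORT A =====
-- literal transliteration: two identical nested loops (one per branch); outer state s = (x, z), inner state t = (y, x)
def mostTouchableLocker (number_of_lockers : Int) (number_of_students : Int) : Option Int :=
  if number_of_lockers < 0 ∨ number_of_students < 0 then none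
  else if number_of_lockers = 0 ∨ number_of_students = 0 then some 0
  else if number_of_lockers < number_of_students ∨ PySem.Int.mod number_of_lockers number_of_students = 0 then
    some (((PySem.List.pyRange 1 (number_of_lockers + 1) 1).foldl
      (fun (s : Int × Int) lockers =>
        let inner := (PySem.List.pyRange 1 (lockers + 1) 1).foldl
          (fun (t : Int × Int) i =>
            let y := if PySem.Int.mod lockers i = 0 then t.1 + 1 else t.1
            (y, if t.2 ≤ y then y else t.2))
          (0, s.1)
        (inner.2, if inner.2 ≤ inner.1 then lockers else s.2))
      (0, 0)).2)
  else
    some (((PySem.List.pyRange 1 (number_of_students + 1) 1).foldl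
      (fun (s : Int × Int) lockers =>
        let inner := (PySem.List.pyRange 1 (lockers + 1) 1).foldl
          (fun (t : Int × Int) i =>
            let y := if PySem.Int.mod lockers i = 0 then t.1 + 1 else t.1
            (y, if t.2 ≤ y then y else t.2))
          (0, s.1)
        (inner.2, if inner.2 ≤ inner.1 then lockers else s.2))
      (0, 0)).2)

-- ===== PORT B =====
-- sieve the divisor counts into a dict (each d adds 1 to all its multiples),
-- then max(range(1, limit+1), key=lambda n: (counts.get(n,0), n))
def mostTouchableLocker_alt (number_of_lockers : Int) (number_of_students : Int) : Option Int :=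
  if number_of_lockers < 0 ∨ number_of_students < 0 then none
  else if number_of_lockers = 0 ∨ number_of_students = 0 then some 0
  else
    let limit : Int :=
      if number_of_lockers < number_of_students ∨ PySem.Int.mod number_of_lockers number_of_students = 0
      then number_of_lockers else number_of_students
    let counts : PySem.Dict Int Int :=
      (PySem.List.pyRange 1 (limit + 1) 1).foldl
        (fun c d => (PySem.List.pyRange d (limit + 1) d).foldl
          (fun c m => c.modify m 0 (· + 1)) c)
        PySem.Dict.empty
    PySem.List.max2? (PySem.List.pyRange 1 (limit + 1) 1) (fun n => counts.getD n 0) (fun n => n)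

-- ===== PRECONDITION & SPEC =====
def Spec_mostTouchableLocker (number_of_lockers : Int) (number_of_students : Int) (out : Option Int) : Prop := out = mostTouchableLocker_alt number_of_lockers number_of_students
instance (number_of_lockers : Int) (number_of_students : Int) (out : Option Int) : Decidable (Spec_mostTouchableLocker number_of_lockers number_of_students out) := by unfold Spec_mostTouchableLocker; infer_instance

-- ===== CLAIM (what is proved, stated in full; the proofs are below) =====
def Claim_equal_mostTouchableLocker : Prop := ∀ (number_of_lockers : Int) (number_of_students : Int), Dom_mostTouchableLocker number_of_lockers number_of_students → Spec_mostTouchableLocker number_of_lockers number_of_students (mostTouchableLocker number_of_lockers number_of_students)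

-- ===== LEMMAS AND PROOFS =====

-- number of divisors of n, as A's inner loop counts them
def pvDivcnt (n : Int) : Int :=
  ((PySem.List.pyRange 1 (n + 1) 1).countP (fun i => decide (PySem.Int.mod n i = 0)) : Int)

-- what A's outer step amounts to, once the inner loop is summarised
def pvStep (g : Int → Int) (s : Int × Int) (n : Int) : Int × Int :=
  if s.1 ≤ g n then (g n, n) else s

-- the fold step of PySem.List.max2? with keys (g n, n)
def pvM (g : Int → Int) (acc : Option Int) (n : Int) : Option Int :=
  match acc with
  | none => some n
  | some m => if (decide (g m < g n) || (!decide (g n < g m) && decide (m < n))) = true then some n else some m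

lemma pv_max2_eq (xs : List Int) (g : Int → Int) :
    PySem.List.max2? xs g (fun n => n) = xs.foldl (pvM g) none := by
  unfold PySem.List.max2?
  congr 1
  funext acc x
  cases acc <;> rfl

lemma pvM_some (g : Int → Int) (m n : Int) (h : m < n) :
    pvM g (some m) n = if g m ≤ g n then some n else some m := by
  simp only [pvM, h, decide_true, Bool.and_true]
  by_cases h1 : g m < g n
  · simp [h1, le_of_lt h1]
  · by_cases h2 : g n < g m
    · simp [h1, h2, not_le.mpr h2]
    · simp [h1, h2, not_lt.mp h2]

-- A's inner loop, given the running max already dominates the divisor counter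
lemma pv_inner_aux (n : Int) (l : List Int) : ∀ y0 x0 : Int, y0 ≤ x0 →
    l.foldl (fun (t : Int × Int) i =>
      let y := if PySem.Int.mod n i = 0 then t.1 + 1 else t.1
      (y, if t.2 ≤ y then y else t.2)) (y0, x0)
    = (y0 + (l.countP (fun i => decide (PySem.Int.mod n i = 0)) : Int),
       max x0 (y0 + (l.countP (fun i => decide (PySem.Int.mod n i = 0)) : Int))) := by
  induction l with
  | nil => intro y0 x0 h; simp [max_eq_left h]
  | cons i t ih =>
    intro y0 x0 h
    have hct : (0 : Int) ≤ (t.countP (fun i => decide (PySem.Int.mod n i = 0)) : Int) := by positivity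
    by_cases hi : PySem.Int.mod n i = 0 <;>
      simp only [List.foldl_cons, List.countP_cons, hi, decide_true, decide_false,
        if_true, if_false] <;>
      rw [ih _ _ (by split_ifs <;> omega)] <;>
      simp only [Prod.mk.injEq, max_def] <;>
      refine ⟨by push_cast; omega, by push_cast; split_ifs <;> omega⟩

-- A's inner loop from an arbitrary state (the list is nonempty: 1 ≤ lockers)
lemma pv_inner (n i : Int) (t : List Int) (y0 x0 : Int) :
    (i :: t).foldl (fun (t : Int × Int) i =>
      let y := if PySem.Int.mod n i = 0 then t.1 + 1 else t.1
      (y, if t.2 ≤ y then y else t.2)) (y0, x0)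
    = (y0 + ((i :: t).countP (fun i => decide (PySem.Int.mod n i = 0)) : Int),
       max x0 (y0 + ((i :: t).countP (fun i => decide (PySem.Int.mod n i = 0)) : Int))) := by
  have hct : (0 : Int) ≤ (t.countP (fun i => decide (PySem.Int.mod n i = 0)) : Int) := by positivity
  by_cases hi : PySem.Int.mod n i = 0 <;>
    simp only [List.foldl_cons, List.countP_cons, hi, decide_true, decide_false,
      if_true, if_false] <;>
    rw [pv_inner_aux _ _ _ _ (by split_ifs <;> omega)] <;>
    simp only [Prod.mk.injEq, max_def] <;>
    refine ⟨by push_cast; omega, by push_cast; split_ifs <;> omega⟩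

-- the two folds walk the (strictly increasing) list in lock step
lemma pv_agree (g : Int → Int) (l : List Int) : ∀ m : Int,
    (∀ n ∈ l, m < n) → l.Pairwise (· < ·) →
    ∃ M, l.foldl (pvStep g) (g m, m) = (g M, M) ∧ l.foldl (pvM g) (some m) = some M := by
  induction l with
  | nil => exact fun m _ _ => ⟨m, rfl, rfl⟩
  | cons n t ih =>
    intro m hlb hp
    have hmn : m < n := hlb n List.mem_cons_self
    have hpc := List.pairwise_cons.mp hp
    simp only [List.foldl_cons, pvM_some g m n hmn, pvStep]
    by_cases h : g m ≤ g n
    · simp only [h, if_true]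
      exact ih n hpc.1 hpc.2
    · simp only [h, if_false]
      exact ih m (fun k hk => hlb k (List.mem_cons_of_mem n hk)) hpc.2

-- one branch of A equals B's argmax, given g agrees with the divisor count on 1..N
lemma pv_branch (g : Int → Int) (N : Int) (hN : 1 ≤ N)
    (hg : ∀ n, 1 ≤ n → n < N + 1 → g n = pvDivcnt n) :
    PySem.List.max2? (PySem.List.pyRange 1 (N + 1) 1) g (fun n => n)
      = some (((PySem.List.pyRange 1 (N + 1) 1).foldl
          (fun (s : Int × Int) lockers =>
            let inner := (PySem.List.pyRange 1 (lockers + 1) 1).foldl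
              (fun (t : Int × Int) i =>
                let y := if PySem.Int.mod lockers i = 0 then t.1 + 1 else t.1
                (y, if t.2 ≤ y then y else t.2))
              (0, s.1)
            (inner.2, if inner.2 ≤ inner.1 then lockers else s.2))
          (0, 0)).2) := by
  have hstep : ∀ (s : Int × Int), ∀ lockers ∈ PySem.List.pyRange 1 (N + 1) 1,
      (fun (s : Int × Int) lockers =>
        let inner := (PySem.List.pyRange 1 (lockers + 1) 1).foldl
          (fun (t : Int × Int) i =>
            let y := if PySem.Int.mod lockers i = 0 then t.1 + 1 else t.1
            (y, if t.2 ≤ y then y else t.2))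
          (0, s.1)
        (inner.2, if inner.2 ≤ inner.1 then lockers else s.2)) s lockers = pvStep g s lockers := by
    intro s lockers hmem
    rw [PySem.List.mem_pyRange_one] at hmem
    have hgl : g lockers = pvDivcnt lockers := hg lockers hmem.1 hmem.2
    have hr : PySem.List.pyRange 1 (lockers + 1) 1 = 1 :: PySem.List.pyRange 2 (lockers + 1) 1 := by
      have := PySem.List.pyRange_one_cons (a := 1) (b := lockers + 1) (by omega)
      simpa using this
    beta_reduce
    rw [hr, pv_inner, ← hr]
    have hc : pvDivcnt lockers
        = ((PySem.List.pyRange 1 (lockers + 1) 1).countP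
            (fun i => decide (PySem.Int.mod lockers i = 0)) : Int) := rfl
    simp only [zero_add, pvStep, hgl, hc]
    by_cases h : s.1 ≤ ((PySem.List.pyRange 1 (lockers + 1) 1).countP
        (fun i => decide (PySem.Int.mod lockers i = 0)) : Int)
    · rw [max_eq_right h, if_pos (le_refl _), if_pos h]
    · rw [max_eq_left (not_le.mp h).le, if_neg h, if_neg h]
  have hfold := PySem.List.foldl_congr_mem (PySem.List.pyRange 1 (N + 1) 1) _ (pvStep g)
    ((0 : Int), (0 : Int)) hstep
  rw [hfold, pv_max2_eq]
  have hcons : PySem.List.pyRange 1 (N + 1) 1 = 1 :: PySem.List.pyRange 2 (N + 1) 1 := by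
    have := PySem.List.pyRange_one_cons (a := 1) (b := N + 1) (by omega)
    simpa using this
  rw [hcons]
  have hg1 : (0 : Int) ≤ g 1 := by
    rw [hg 1 le_rfl (by omega)]; unfold pvDivcnt; positivity
  have h1 : pvStep g (0, 0) 1 = (g 1, 1) := by simp [pvStep, hg1]
  have hM1 : pvM g none 1 = some 1 := rfl
  simp only [List.foldl_cons, h1, hM1]
  obtain ⟨M, hA, hB⟩ := pv_agree g (PySem.List.pyRange 2 (N + 1) 1) 1
    (fun n hn => by rw [PySem.List.mem_pyRange_one] at hn; omega)
    (PySem.List.pairwise_lt_pyRange_one 2 (N + 1))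
  rw [hB, hA]

-- the sieve dict holds exactly the divisor counts on 1..N
lemma pv_counts (N n : Int) (h1 : 1 ≤ n) (h2 : n < N + 1) :
    ((PySem.List.pyRange 1 (N + 1) 1).foldl
        (fun c d => (PySem.List.pyRange d (N + 1) d).foldl
          (fun c m => c.modify m 0 (· + 1)) c)
        (PySem.Dict.empty : PySem.Dict Int Int)).getD n 0 = pvDivcnt n := by
  rw [← List.foldl_flatMap, PySem.Dict.getD_foldl_modify_add_one]
  have hempty : (PySem.Dict.empty : PySem.Dict Int Int).getD n 0 = 0 := by simp
  rw [hempty, zero_add]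
  -- membership in the list of multiples of d
  have hmem : ∀ d : Int, 0 < d → (n ∈ PySem.List.pyRange d (N + 1) d ↔ d ∣ n ∧ d ≤ n) := by
    intro d hd
    rw [PySem.List.mem_pyRange_iff_of_pos hd]
    constructor
    · rintro ⟨hdn, _, hdvd⟩
      exact ⟨by have := dvd_add hdvd (dvd_refl d); simpa using this, hdn⟩
    · rintro ⟨hdvd, hdn⟩
      exact ⟨hdn, h2, dvd_sub hdvd (dvd_refl d)⟩
  have hnd : ∀ d : Int, 0 < d → (PySem.List.pyRange d (N + 1) d).Nodup := by
    intro d hd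
    rw [PySem.List.pyRange_of_pos _ _ hd]
    refine List.Nodup.map ?_ List.nodup_range
    intro a b hab
    simp only at hab
    have h3 : d * (a : Int) = d * (b : Int) := by omega
    have h4 := mul_left_cancel₀ (ne_of_gt hd) h3
    exact_mod_cast h4
  have hcnt : ∀ d ∈ PySem.List.pyRange 1 (N + 1) 1,
      (List.count n ∘ (fun d => PySem.List.pyRange d (N + 1) d)) d
        = if decide (d ∣ n ∧ d ≤ n) then 1 else 0 := by
    intro d hd
    rw [PySem.List.mem_pyRange_one] at hd
    have hd0 : (0 : Int) < d := by omega
    by_cases hP : d ∣ n ∧ d ≤ n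
    · have hm : n ∈ PySem.List.pyRange d (N + 1) d := (hmem d hd0).mpr hP
      have hle := List.nodup_iff_count_le_one.mp (hnd d hd0) n
      have hpos := List.count_pos_iff.mpr hm
      simp only [Function.comp_apply]
      rw [if_pos (decide_eq_true hP)]
      omega
    · have hm : n ∉ PySem.List.pyRange d (N + 1) d := fun h => hP ((hmem d hd0).mp h)
      simp only [Function.comp_apply]
      rw [if_neg (by simpa using hP)]
      exact List.count_eq_zero.mpr hm
  have hNat : List.count n ((PySem.List.pyRange 1 (N + 1) 1).flatMap
      (fun d => PySem.List.pyRange d (N + 1) d))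
      = (PySem.List.pyRange 1 (n + 1) 1).countP (fun i => decide (PySem.Int.mod n i = 0)) := by
    rw [List.count_flatMap, List.map_congr_left hcnt,
      PySem.List.sum_map_ite_one_zero_nat (fun d => decide (d ∣ n ∧ d ≤ n))]
    rw [PySem.List.pyRange_one_append 1 (n + 1) (N + 1) (by omega) (by omega), List.countP_append]
    have htail : (PySem.List.pyRange (n + 1) (N + 1) 1).countP
        (fun d => decide (d ∣ n ∧ d ≤ n)) = 0 := by
      rw [List.countP_eq_zero]
      intro d hd
      rw [PySem.List.mem_pyRange_one] at hd
      simp only [decide_eq_true_eq, not_and]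
      intro _
      omega
    have hhead : (PySem.List.pyRange 1 (n + 1) 1).countP (fun d => decide (d ∣ n ∧ d ≤ n))
        = (PySem.List.pyRange 1 (n + 1) 1).countP (fun i => decide (PySem.Int.mod n i = 0)) := by
      refine List.countP_congr ?_
      intro x hx
      rw [PySem.List.mem_pyRange_one] at hx
      simp only [decide_eq_true_eq, PySem.Int.mod_eq_zero_iff_dvd]
      constructor
      · exact fun h => h.1
      · intro h
        exact ⟨h, Int.le_of_dvd (by omega) h⟩
    rw [htail, hhead, add_zero]
  rw [hNat]
  rfl

-- ===== VERDICT (by name: the statement is the Claim_ definition above) =====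
theorem mostTouchableLocker_spec : Claim_equal_mostTouchableLocker := by
  intro nl ns _
  unfold Spec_mostTouchableLocker mostTouchableLocker mostTouchableLocker_alt
  split_ifs with h1 h2 h3
  · rfl
  · rfl
  · rw [pv_branch _ nl (by omega) (fun n hn1 hn2 => pv_counts nl n hn1 hn2)]
  · rw [pv_branch _ ns (by omega) (fun n hn1 hn2 => pv_counts ns n hn1 hn2)]
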